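-- pv_equiv track=rewrite | github.com/scovid/scovid19.xyz | scovid19/lib/data/Vaccines.py | get_totals
-- ===== SOURCE A (Python) =====
-- def get_totals(records):
--     totals = {
--         "dose1": 0,
--         "dose2": 0,
--     }
--
--     for record in records:
--         if (
--             record["Product"] == "Total"
--             and record["AgeBand"] == "16 years and over"
--         ):
--             if record["Dose"] == "Dose 1":
--                 totals["dose1"] += int(record["NumberVaccinated"])
--             elif record["Dose"] == "Dose 2":
--                 totals["dose2"] += int(record["NumberVaccinated"])
--
--     return totals
-- ===== SOURCE B (Python) =====
-- def get_totals(records):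
--     def eligible(record, dose):
--         return (record["Product"] == "Total"
--                 and record["AgeBand"] == "16 years and over"
--                 and record["Dose"] == dose)
--
--     return {
--         "dose1": sum(int(r["NumberVaccinated"]) for r in records if eligible(r, "Dose 1")),
--         "dose2": sum(int(r["NumberVaccinated"]) for r in records if eligible(r, "Dose 2")),
--     }
-- ===== Notes on version B (the rewrite author's own statement) =====
-- stated objective: simpler
-- what changed: Replaces the single mutating branch-accumulate loop over a totals dict with two independent filtered sum() comprehensions, one per dose, returned in a dict literal.
import Mathlib
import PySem

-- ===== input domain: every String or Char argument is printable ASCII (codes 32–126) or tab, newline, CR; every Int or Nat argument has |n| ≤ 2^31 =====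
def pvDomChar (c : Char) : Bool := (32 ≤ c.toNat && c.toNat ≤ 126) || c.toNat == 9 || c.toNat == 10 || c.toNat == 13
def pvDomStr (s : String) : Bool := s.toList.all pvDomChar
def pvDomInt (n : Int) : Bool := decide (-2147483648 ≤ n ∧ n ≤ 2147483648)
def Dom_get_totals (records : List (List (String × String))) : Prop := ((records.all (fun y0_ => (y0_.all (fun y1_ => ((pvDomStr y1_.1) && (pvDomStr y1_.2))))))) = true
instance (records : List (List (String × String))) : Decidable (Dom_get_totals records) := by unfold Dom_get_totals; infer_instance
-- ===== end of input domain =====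

-- B replaces A's single mutating branch-accumulate loop over a totals dict with two
-- independent filtered sums (one per dose); objective: simpler decomposition, same cost.


-- shared Python-semantics helpers: dict lookup (first match; "" default is only reached
-- outside Pre_, where the Python raises KeyError) and int() (0 default only outside Pre_)
def pvGet (r : List (String × String)) (k : String) : String :=
  (PySem.Dict.mk r).getD k ""

def pvNum (r : List (String × String)) : Int :=
  (PySem.Int.ofStr? (pvGet r "NumberVaccinated")).getD 0

-- ===== PORT A =====
-- transliteration of A: one fold over records carrying the totals dict, nested branches
def get_totals (records : List (List (String × String))) : List (String × Int) :=
  (records.foldl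
    (fun (totals : PySem.Dict String Int) record =>
      if pvGet record "Product" == "Total" && pvGet record "AgeBand" == "16 years and over" then
        if pvGet record "Dose" == "Dose 1" then
          totals.insert "dose1" (totals.getD "dose1" 0 + pvNum record)
        else if pvGet record "Dose" == "Dose 2" then
          totals.insert "dose2" (totals.getD "dose2" 0 + pvNum record)
        else totals
      else totals)
    (PySem.Dict.ofList [("dose1", 0), ("dose2", 0)])).items

-- ===== PORT B =====
-- transliteration of B: an eligibility predicate and two independent filtered sums
def pvEligible (record : List (String × String)) (dose : String) : Bool :=
  pvGet record "Product" == "Total" &&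
  pvGet record "AgeBand" == "16 years and over" &&
  pvGet record "Dose" == dose

def pvSumDose (records : List (List (String × String))) (dose : String) : Int :=
  ((records.filter (fun r => pvEligible r dose)).map pvNum).sum

def get_totals_alt (records : List (List (String × String))) : List (String × Int) :=
  [("dose1", pvSumDose records "Dose 1"), ("dose2", pvSumDose records "Dose 2")]

-- ===== PRECONDITION & SPEC =====
-- Pre_ excludes exactly the inputs on which the Python A raises: a missing key among those
-- A actually reads (KeyError) or a non-int NumberVaccinated on a summed record (ValueError).
def Pre_get_totals (records : List (List (String × String))) : Prop :=
  ∀ r ∈ records,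
    ((PySem.Dict.mk r).get? "Product").isSome ∧
    ((PySem.Dict.mk r).getD "Product" "" = "Total" →
      ((PySem.Dict.mk r).get? "AgeBand").isSome ∧
      ((PySem.Dict.mk r).getD "AgeBand" "" = "16 years and over" →
        ((PySem.Dict.mk r).get? "Dose").isSome ∧
        (((PySem.Dict.mk r).getD "Dose" "" = "Dose 1" ∨ (PySem.Dict.mk r).getD "Dose" "" = "Dose 2") →
          ((PySem.Dict.mk r).get? "NumberVaccinated").isSome ∧
          (PySem.Int.ofStr? ((PySem.Dict.mk r).getD "NumberVaccinated" "")).isSome)))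

instance (records : List (List (String × String))) : Decidable (Pre_get_totals records) := by
  unfold Pre_get_totals; infer_instance

def pvWitness_get_totals : (List (List (String × String))) :=
  [[("Product", "Total"), ("AgeBand", "16 years and over"),
    ("Dose", "Dose 1"), ("NumberVaccinated", "5")]]

def Spec_get_totals (records : List (List (String × String))) (out : List (String × Int)) : Prop := out = get_totals_alt records
instance (records : List (List (String × String))) (out : List (String × Int)) : Decidable (Spec_get_totals records out) := by unfold Spec_get_totals; infer_instance

-- ===== CLAIM (what is proved, stated in full; the proofs are below) =====
def Claim_equal_get_totals : Prop := ∀ (records : List (List (String × String))), Dom_get_totals records → Pre_get_totals records → Spec_get_totals records (get_totals records)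

-- ===== LEMMAS AND PROOFS =====

-- the loop invariant: starting from dose1 ↦ a, dose2 ↦ b, A's fold adds B's two filtered sums
theorem pv_loop (records : List (List (String × String))) (a b : Int) :
    (records.foldl
      (fun (totals : PySem.Dict String Int) record =>
        if pvGet record "Product" == "Total" && pvGet record "AgeBand" == "16 years and over" then
          if pvGet record "Dose" == "Dose 1" then
            totals.insert "dose1" (totals.getD "dose1" 0 + pvNum record)
          else if pvGet record "Dose" == "Dose 2" then
            totals.insert "dose2" (totals.getD "dose2" 0 + pvNum record)
          else totals
        else totals)
      (PySem.Dict.mk [("dose1", a), ("dose2", b)])).items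
    = [("dose1", a + pvSumDose records "Dose 1"), ("dose2", b + pvSumDose records "Dose 2")] := by
  induction records generalizing a b with
  | nil => simp [pvSumDose]
  | cons r rs ih =>
      by_cases h1 : (pvGet r "Product" == "Total" && pvGet r "AgeBand" == "16 years and over") = true
      · by_cases hd1 : (pvGet r "Dose" == "Dose 1") = true
        · have hd2 : (pvGet r "Dose" == "Dose 2") = false := by simp_all
          have hins : (PySem.Dict.mk [("dose1", a), ("dose2", b)]).insert "dose1"
              ((PySem.Dict.mk [("dose1", a), ("dose2", b)]).getD "dose1" 0 + pvNum r)
              = PySem.Dict.mk [("dose1", a + pvNum r), ("dose2", b)] := by rfl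
          simp only [List.foldl_cons, h1, hd1, if_true, hins, ih, pvSumDose]
          simp [pvEligible, h1, hd1, hd2]
          ring
        · by_cases hd2 : (pvGet r "Dose" == "Dose 2") = true
          · have hins : (PySem.Dict.mk [("dose1", a), ("dose2", b)]).insert "dose2"
                ((PySem.Dict.mk [("dose1", a), ("dose2", b)]).getD "dose2" 0 + pvNum r)
                = PySem.Dict.mk [("dose1", a), ("dose2", b + pvNum r)] := by rfl
            simp only [List.foldl_cons, h1, hd1, hd2, if_true, if_false, Bool.false_eq_true,
              hins, ih, pvSumDose]
            simp [pvEligible, h1, hd1, hd2]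
            ring
          · simp only [List.foldl_cons, h1, hd1, hd2, if_true, if_false, Bool.false_eq_true,
              ih, pvSumDose]
            simp [pvEligible, h1, hd1, hd2]
      · have h1' : (pvGet r "Product" == "Total" && pvGet r "AgeBand" == "16 years and over") = false := by
          simp_all
        simp only [List.foldl_cons, h1', if_false, Bool.false_eq_true, ih, pvSumDose]
        simp [pvEligible, h1']

-- ===== VERDICT (by name: the statement is the Claim_ definition above) =====
theorem get_totals_spec : Claim_equal_get_totals := by
  intro records _ _
  show get_totals records = get_totals_alt records
  have h := pv_loop records 0 0
  simp only [get_totals, get_totals_alt]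
  have : PySem.Dict.ofList ([("dose1", 0), ("dose2", 0)] : List (String × Int))
      = PySem.Dict.mk [("dose1", 0), ("dose2", 0)] := by rfl
  rw [this, h]
  simp
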